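-- pv_equiv track=rewrite | github.com/ngoctnq/cryptographic-filematcher | util.py | poly_eval
-- ===== SOURCE A (Python) =====
-- BIG_ASS_PRIME = 7337488745629403488410174275830423641502142554560856136484326749638755396267050319392266204256751706077766067020335998122952792559058552724477442839630133
--
-- def poly_eval(coeffs, x):
-- 	'''
-- 	Apply Horner's rule for fast polynomial evaluation.
-- 	'''
-- 	ret = 0
-- 	for i in coeffs:
-- 		ret *= x
-- 		ret %= BIG_ASS_PRIME
-- 		ret += i
-- 		ret %= BIG_ASS_PRIME
-- 	return ret
-- ===== SOURCE B (Python) =====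
-- BIG_ASS_PRIME = 7337488745629403488410174275830423641502142554560856136484326749638755396267050319392266204256751706077766067020335998122952792559058552724477442839630133
--
-- def poly_eval(coeffs, x):
-- 	'''
-- 	Evaluate the polynomial as an explicit sum of coefficient * power-of-x terms,
-- 	scanning coefficients from lowest degree to highest with a maintained power.
-- 	'''
-- 	ret = 0
-- 	power = 1
-- 	for c in reversed(coeffs):
-- 		ret = (ret + c * power) % BIG_ASS_PRIME
-- 		power = (power * x) % BIG_ASS_PRIME
-- 	return ret
-- ===== Notes on version B (the rewrite author's own statement) =====
-- stated objective: alternative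
-- what changed: Replaces Horner's nested multiply-add (high-to-low degree) with an explicit term summation low-to-high degree that maintains a running power of x modulo the prime.
import Mathlib
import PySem

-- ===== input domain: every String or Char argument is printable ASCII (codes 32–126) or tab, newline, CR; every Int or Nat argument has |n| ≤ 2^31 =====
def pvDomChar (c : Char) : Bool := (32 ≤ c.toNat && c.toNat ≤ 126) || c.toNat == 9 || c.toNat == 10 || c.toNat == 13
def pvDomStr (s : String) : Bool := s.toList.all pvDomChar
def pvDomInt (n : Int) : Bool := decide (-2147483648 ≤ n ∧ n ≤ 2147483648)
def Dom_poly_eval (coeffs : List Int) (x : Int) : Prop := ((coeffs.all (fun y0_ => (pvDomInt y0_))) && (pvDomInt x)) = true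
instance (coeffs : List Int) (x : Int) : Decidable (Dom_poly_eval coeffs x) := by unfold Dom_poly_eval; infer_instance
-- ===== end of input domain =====

-- B evaluates the polynomial as an explicit sum of coefficient*power terms (low-to-high
-- degree, maintaining a running power of x mod the prime) instead of Horner's rule; same cost.


def BIG_ASS_PRIME : Int := 7337488745629403488410174275830423641502142554560856136484326749638755396267050319392266204256751706077766067020335998122952792559058552724477442839630133

-- ===== PORT A =====
-- Horner's rule: ret = ((ret * x) % p + i) % p for each coefficient, high to low degree.
def poly_eval (coeffs : List Int) (x : Int) : Int :=
  coeffs.foldl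
    (fun ret i =>
      PySem.Int.mod (PySem.Int.mod (ret * x) BIG_ASS_PRIME + i) BIG_ASS_PRIME)
    0

-- ===== PORT B =====
-- Explicit term summation over reversed coeffs with a maintained power of x.
def poly_eval_alt (coeffs : List Int) (x : Int) : Int :=
  (coeffs.reverse.foldl
    (fun s c =>
      (PySem.Int.mod (s.1 + c * s.2) BIG_ASS_PRIME,
       PySem.Int.mod (s.2 * x) BIG_ASS_PRIME))
    ((0 : Int), (1 : Int))).1

-- ===== PRECONDITION & SPEC =====
def Spec_poly_eval (coeffs : List Int) (x : Int) (out : Int) : Prop := out = poly_eval_alt coeffs x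
instance (coeffs : List Int) (x : Int) (out : Int) : Decidable (Spec_poly_eval coeffs x out) := by unfold Spec_poly_eval; infer_instance

-- ===== CLAIM (what is proved, stated in full; the proofs are below) =====
def Claim_equal_poly_eval : Prop := ∀ (coeffs : List Int) (x : Int), Dom_poly_eval coeffs x → Spec_poly_eval coeffs x (poly_eval coeffs x)

-- ===== LEMMAS AND PROOFS =====

theorem pv_P_pos : (0 : Int) < BIG_ASS_PRIME := by norm_num [BIG_ASS_PRIME]

theorem pv_pmod (a : Int) : PySem.Int.mod a BIG_ASS_PRIME = a % BIG_ASS_PRIME :=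
  PySem.Int.mod_eq_emod_of_pos pv_P_pos

-- exact (un-modded) Horner value
def pvH (x : Int) (cs : List Int) (r : Int) : Int :=
  cs.foldl (fun a c => a * x + c) r

-- exact sum of c_i * p * x^i over cs
def pvT (x : Int) : List Int → Int → Int
  | [], _ => 0
  | c :: cs, p => c * p + pvT x cs (p * x)

theorem pvME (a : Int) : Int.ModEq BIG_ASS_PRIME (a % BIG_ASS_PRIME) a :=
  Int.emod_emod_of_dvd a dvd_rfl

theorem pvH_cong (x : Int) (cs : List Int) : ∀ a b : Int,
    Int.ModEq BIG_ASS_PRIME a b →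
    Int.ModEq BIG_ASS_PRIME (pvH x cs a) (pvH x cs b) := by
  induction cs with
  | nil => intro a b h; simpa [pvH] using h
  | cons c cs ih =>
    intro a b h
    simp only [pvH, List.foldl_cons] at *
    exact ih _ _ ((h.mul_right x).add_right c)

theorem pvT_cong (x : Int) (cs : List Int) : ∀ p q : Int,
    Int.ModEq BIG_ASS_PRIME p q →
    Int.ModEq BIG_ASS_PRIME (pvT x cs p) (pvT x cs q) := by
  induction cs with
  | nil => intro p q _; rfl
  | cons c cs ih =>
    intro p q h
    simp only [pvT]
    exact (h.mul_left c).add (ih _ _ (h.mul_right x))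

-- A's loop computes the pure Horner value mod p (for nonempty cs)
theorem pvA_eq (x : Int) (cs : List Int) : ∀ r : Int, cs ≠ [] →
    cs.foldl (fun ret i =>
      ((ret * x) % BIG_ASS_PRIME + i) % BIG_ASS_PRIME) r
      = pvH x cs r % BIG_ASS_PRIME := by
  induction cs with
  | nil => intro r h; exact absurd rfl h
  | cons c cs ih =>
    intro r _
    simp only [List.foldl_cons]
    cases cs with
    | nil =>
      simp only [List.foldl_nil, pvH, List.foldl_cons]
      exact (pvME (r * x)).add_right c
    | cons d ds =>
      rw [ih _ (by simp)]
      show pvH x (d :: ds) _ % BIG_ASS_PRIME = pvH x (c :: d :: ds) r % BIG_ASS_PRIME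
      simp only [pvH, List.foldl_cons]
      exact pvH_cong x ds _ _
        ((((pvME _).trans ((pvME (r * x)).add_right c)).mul_right x).add_right d)

-- B's loop computes r + sum of terms, mod p (for nonempty cs)
theorem pvB_eq (x : Int) (cs : List Int) : ∀ r p : Int, cs ≠ [] →
    (cs.foldl (fun s c =>
      ((s.1 + c * s.2) % BIG_ASS_PRIME,
       (s.2 * x) % BIG_ASS_PRIME)) (r, p)).1
      = (r + pvT x cs p) % BIG_ASS_PRIME := by
  induction cs with
  | nil => intro r p h; exact absurd rfl h
  | cons c cs ih =>
    intro r p _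
    simp only [List.foldl_cons]
    cases cs with
    | nil => simp [pvT]
    | cons d ds =>
      rw [ih _ _ (by simp)]
      rw [show pvT x (c :: d :: ds) p = c * p + pvT x (d :: ds) (p * x) from rfl, ← add_assoc]
      exact (pvME (r + c * p)).add (pvT_cong x (d :: ds) _ _ (pvME (p * x)))

theorem pvT_append (x : Int) (l : List Int) : ∀ (c p : Int),
    pvT x (l ++ [c]) p = pvT x l p + c * (p * x ^ l.length) := by
  induction l with
  | nil => intro c p; simp [pvT]
  | cons d l ih =>
    intro c p
    simp only [List.cons_append, pvT, ih, List.length_cons]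
    ring

theorem pvHT (x : Int) (cs : List Int) : ∀ r : Int,
    pvH x cs r = pvT x cs.reverse 1 + r * x ^ cs.length := by
  induction cs with
  | nil => intro r; simp [pvH, pvT]
  | cons c cs ih =>
    intro r
    simp only [pvH, List.foldl_cons, List.reverse_cons, List.length_cons]
    rw [show List.foldl (fun a c => a * x + c) (r * x + c) cs = pvH x cs (r * x + c) from rfl,
        ih, pvT_append, List.length_reverse]
    ring

-- ===== VERDICT (by name: the statement is the Claim_ definition above) =====
theorem poly_eval_spec : Claim_equal_poly_eval := by
  intro coeffs x _
  unfold Spec_poly_eval poly_eval poly_eval_alt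
  simp only [pv_pmod]
  cases coeffs with
  | nil => rfl
  | cons c cs =>
    rw [pvA_eq x (c :: cs) 0 (by simp),
        pvB_eq x (c :: cs).reverse 0 1 (by simp),
        pvHT, zero_add, zero_mul, add_zero]
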